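-- pv_equiv track=rewrite | github.com/WGLab/DeepRepeat | bin/scripts/myGaussianMixtureModel.py | getNeighbors_reads
-- ===== SOURCE A (Python) =====
-- def getWindowForCounts(cur_point):
-- 	cur_window = int(cur_point/200.0+0.75) + 1
-- 	return cur_window
--
-- def getNeighbors_reads(lendict, cur_point, minreads):
-- 	cur_window = getWindowForCounts(cur_point) #int(cur_point/200.0+0.75)
-- 	cur_sum_read = 0; total_k = cur_window*2+1; has_k = 0;
-- 	for curk in range(cur_point-cur_window, cur_point+cur_window+1):
-- 		if curk in lendict:
-- 			cur_sum_read += lendict[curk]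
-- 			has_k += 1;
-- 	#print cur_point, [cur_sum_read, has_k, total_k]
--
-- 	#if cur_window==0:
-- 	#	for i in [-1, 1]:
-- 	#		if lendict.has_key(cur_point+i):
-- 	#			print cur_point+i, lendict[cur_point+i], cur_sum_read
-- 	#			if lendict[cur_point+i]>lendict[cur_point]:
-- 	#				if lendict[cur_point+i]<cur_sum_read:
-- 	#					print 'Error!!!! ', lendict[cur_point+i], cur_sum_read, cur_point, i
-- 	#				cur_sum_read = lendict[cur_point+i]
--
-- 	return [cur_sum_read, has_k, total_k]
-- ===== SOURCE B (Python) =====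
-- def getNeighbors_reads(lendict, cur_point, minreads):
--     cur_window = int(cur_point / 200.0 + 0.75) + 1
--     lo = cur_point - cur_window
--     hi = cur_point + cur_window
--     cur_sum_read = 0
--     has_k = 0
--     for k, v in lendict.items():
--         if lo <= k <= hi:
--             cur_sum_read += v
--             has_k += 1
--     return [cur_sum_read, has_k, 2 * cur_window + 1]
-- ===== Notes on version B (the rewrite author's own statement) =====
-- stated objective: alternative
-- what changed: Instead of scanning the window range(cur_point-w, cur_point+w+1) and probing the dict for each position, B computes the window bounds once and makes a single pass over lendict.items(), accumulating sum and count for entries whose key falls inside the window.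
import Mathlib
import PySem

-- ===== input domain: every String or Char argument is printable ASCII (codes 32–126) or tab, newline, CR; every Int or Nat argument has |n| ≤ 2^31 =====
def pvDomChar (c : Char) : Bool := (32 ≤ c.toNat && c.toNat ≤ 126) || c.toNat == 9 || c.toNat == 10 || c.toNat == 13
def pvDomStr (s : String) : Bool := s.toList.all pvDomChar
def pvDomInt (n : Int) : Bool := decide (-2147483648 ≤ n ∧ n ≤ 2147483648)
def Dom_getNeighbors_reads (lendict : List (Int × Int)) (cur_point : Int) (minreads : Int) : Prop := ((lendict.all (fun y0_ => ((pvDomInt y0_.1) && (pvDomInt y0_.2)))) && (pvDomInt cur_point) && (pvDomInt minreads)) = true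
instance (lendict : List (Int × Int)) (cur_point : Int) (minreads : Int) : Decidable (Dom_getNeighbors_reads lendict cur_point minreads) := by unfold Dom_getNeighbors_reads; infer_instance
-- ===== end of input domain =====

-- B makes one pass over the dict's entries filtered by the window bounds instead of scanning the
-- window range and probing the dict per position (objective: alternative decomposition, same results).


-- ===== PORT A =====
-- int(cur_point/200.0+0.75) + 1: for |cur_point| ≤ 2^31 the float expression cur_point/200.0+0.75 is
-- within 3e-9 of the rational (cur_point+150)/200 and exact whenever that rational is an integer, so
-- Python's int() (truncation toward zero) equals Int.tdiv (cur_point+150) 200 on the whole domain.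
def getWindowForCounts (cur_point : Int) : Int :=
  Int.tdiv (cur_point + 150) 200 + 1

def getNeighbors_reads (lendict : List (Int × Int)) (cur_point : Int) (minreads : Int) : List Int :=
  let cur_window := getWindowForCounts cur_point
  let total_k := cur_window * 2 + 1
  let st := (PySem.List.pyRange (cur_point - cur_window) (cur_point + cur_window + 1) 1).foldl
    (fun (st : Int × Int) curk =>
      match (PySem.Dict.mk lendict).get? curk with
      | some v => (st.1 + v, st.2 + 1)
      | none => st) (0, 0)
  [st.1, st.2, total_k]

-- ===== PORT B =====
def getNeighbors_reads_alt (lendict : List (Int × Int)) (cur_point : Int) (minreads : Int) : List Int :=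
  let cur_window := Int.tdiv (cur_point + 150) 200 + 1
  let lo := cur_point - cur_window
  let hi := cur_point + cur_window
  let st := lendict.foldl
    (fun (st : Int × Int) kv =>
      if lo ≤ kv.1 ∧ kv.1 ≤ hi then (st.1 + kv.2, st.2 + 1) else st) (0, 0)
  [st.1, st.2, 2 * cur_window + 1]

-- ===== PRECONDITION & SPEC =====
-- Pre_ only states well-formedness of the dict encoding: a Python dict has distinct keys, so no
-- Python-reachable input is excluded; on assoc lists with duplicate keys the two ports may differ.
def Pre_getNeighbors_reads (lendict : List (Int × Int)) (cur_point : Int) (minreads : Int) : Prop :=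
  (lendict.map Prod.fst).Nodup
instance (lendict : List (Int × Int)) (cur_point : Int) (minreads : Int) : Decidable (Pre_getNeighbors_reads lendict cur_point minreads) := by unfold Pre_getNeighbors_reads; infer_instance

def pvWitness_getNeighbors_reads : (List (Int × Int)) × Int × Int := ([(3, 5), (4, 7)], 3, 0)

def Spec_getNeighbors_reads (lendict : List (Int × Int)) (cur_point : Int) (minreads : Int) (out : List Int) : Prop := out = getNeighbors_reads_alt lendict cur_point minreads
instance (lendict : List (Int × Int)) (cur_point : Int) (minreads : Int) (out : List Int) : Decidable (Spec_getNeighbors_reads lendict cur_point minreads out) := by unfold Spec_getNeighbors_reads; infer_instance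

-- ===== CLAIM (what is proved, stated in full; the proofs are below) =====
def Claim_equal_getNeighbors_reads : Prop := ∀ (lendict : List (Int × Int)) (cur_point : Int) (minreads : Int), Dom_getNeighbors_reads lendict cur_point minreads → Pre_getNeighbors_reads lendict cur_point minreads → Spec_getNeighbors_reads lendict cur_point minreads (getNeighbors_reads lendict cur_point minreads)

-- ===== LEMMAS AND PROOFS =====

-- a foldl that adds f and g componentwise is a pair of sums
theorem pv_foldl_pair {α : Type} (f g : α → Int) (L : List α) (a b : Int) :
    L.foldl (fun (st : Int × Int) x => (st.1 + f x, st.2 + g x)) (a, b)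
      = (a + (L.map f).sum, b + (L.map g).sum) := by
  induction L generalizing a b with
  | nil => simp
  | cons x t ih => simp [ih]; constructor <;> ring

theorem pv_sum_map_ite_eq (R : List Int) (hR : R.Nodup) (k0 a : Int) (h : Int → Int)
    (h0 : h k0 = 0) :
    (R.map (fun k => if k = k0 then a else h k)).sum
      = (if k0 ∈ R then a else 0) + (R.map h).sum := by
  induction R with
  | nil => simp
  | cons r R' ih =>
    rcases List.nodup_cons.mp hR with ⟨hr, hR'⟩
    by_cases hrk : r = k0
    · have hmap : R'.map (fun k => if k = k0 then a else h k) = R'.map h := by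
        apply List.map_congr_left
        intro k hk
        have hkne : k ≠ k0 := fun e => hr (by rw [hrk, ← e]; exact hk)
        simp [hkne]
      have hmem : k0 ∈ r :: R' := by simp [hrk]
      simp only [List.map_cons, List.sum_cons, if_pos hrk, hmap, if_pos hmem, hrk, h0]
      simp [add_comm]
    · have hmem : (k0 ∈ r :: R') ↔ k0 ∈ R' := by
        constructor
        · intro hm
          rcases List.mem_cons.mp hm with he | hm'
          · exact absurd he.symm hrk
          · exact hm'
        · exact fun hm => List.mem_cons_of_mem _ hm
      simp only [List.map_cons, List.sum_cons, if_neg hrk, ih hR', hmem]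
      ring

-- sum of a function of the dict lookup over a nodup key list R equals the filtered sum over entries
theorem pv_lookup_sum (l : List (Int × Int)) (hl : (l.map Prod.fst).Nodup)
    (R : List Int) (hR : R.Nodup) (f : Option Int → Int) (hf : f none = 0) :
    (R.map (fun k => f ((PySem.Dict.mk l).get? k))).sum
      = (l.map (fun kv => if kv.1 ∈ R then f (some kv.2) else 0)).sum := by
  induction l with
  | nil =>
    have hget : ∀ k : Int, (PySem.Dict.mk ([] : List (Int × Int))).get? k = none := by
      intro k; simp [PySem.Dict.get?]
    simp [hget, hf]
  | cons kv t ih =>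
    rw [List.map_cons] at hl
    rcases List.nodup_cons.mp hl with ⟨hk0, ht⟩
    have hnone : (PySem.Dict.mk t).get? kv.1 = none := by
      rw [PySem.Dict.get?_eq_none_iff_not_mem_keys]
      simpa [PySem.Dict.keys] using hk0
    have hstep : (R.map (fun k => f ((PySem.Dict.mk (kv :: t)).get? k)))
        = R.map (fun k => if k = kv.1 then f (some kv.2) else f ((PySem.Dict.mk t).get? k)) := by
      apply List.map_congr_left
      intro k _
      rw [show (kv :: t) = ((kv.1, kv.2) :: t) by simp, PySem.Dict.get?_mk_cons]
      by_cases hkk : k = kv.1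
      · simp [hkk]
      · simp [Ne.symm hkk, hkk]
    have hkey := pv_sum_map_ite_eq R hR kv.1 (f (some kv.2))
      (fun k => f ((PySem.Dict.mk t).get? k))
      (by show f ((PySem.Dict.mk t).get? kv.1) = 0; rw [hnone]; exact hf)
    rw [hstep, hkey, ih ht, List.map_cons, List.sum_cons]

theorem getNeighbors_reads_eq (lendict : List (Int × Int)) (cur_point : Int) (minreads : Int)
    (hpre : (lendict.map Prod.fst).Nodup) :
    getNeighbors_reads lendict cur_point minreads = getNeighbors_reads_alt lendict cur_point minreads := by
  simp only [getNeighbors_reads, getNeighbors_reads_alt, getWindowForCounts]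
  set w := Int.tdiv (cur_point + 150) 200 + 1 with hw
  set R := PySem.List.pyRange (cur_point - w) (cur_point + w + 1) 1 with hRdef
  have hRnd : R.Nodup := PySem.List.nodup_pyRange_one _ _
  have hmemR : ∀ k : Int, k ∈ R ↔ cur_point - w ≤ k ∧ k ≤ cur_point + w := by
    intro k
    rw [hRdef, PySem.List.mem_pyRange_one, Int.lt_add_one_iff]
  -- A's fold body in additive form
  have hA : (fun (st : Int × Int) curk =>
        match (PySem.Dict.mk lendict).get? curk with
        | some v => (st.1 + v, st.2 + 1)
        | none => st)
      = fun (st : Int × Int) k =>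
        (st.1 + ((PySem.Dict.mk lendict).get? k).getD 0,
         st.2 + (if ((PySem.Dict.mk lendict).get? k).isSome then 1 else 0)) := by
    funext st k
    cases h : (PySem.Dict.mk lendict).get? k <;> simp [h]
  -- B's fold body in additive form
  have hB : (fun (st : Int × Int) (kv : Int × Int) =>
        if cur_point - w ≤ kv.1 ∧ kv.1 ≤ cur_point + w then (st.1 + kv.2, st.2 + 1) else st)
      = fun (st : Int × Int) kv =>
        (st.1 + (if cur_point - w ≤ kv.1 ∧ kv.1 ≤ cur_point + w then kv.2 else 0),
         st.2 + (if cur_point - w ≤ kv.1 ∧ kv.1 ≤ cur_point + w then (1 : Int) else 0)) := by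
    funext st kv
    split <;> simp
  rw [hA, hB, pv_foldl_pair, pv_foldl_pair]
  have hsum := pv_lookup_sum lendict hpre R hRnd (fun o => o.getD 0) rfl
  have hcnt := pv_lookup_sum lendict hpre R hRnd (fun o => if o.isSome then 1 else 0) rfl
  simp only [hmemR] at hsum hcnt
  simp only [zero_add, hsum, hcnt]
  simp [mul_comm]

-- ===== VERDICT (by name: the statement is the Claim_ definition above) =====
theorem getNeighbors_reads_spec : Claim_equal_getNeighbors_reads := by
  intro lendict cur_point minreads _ hpre
  unfold Spec_getNeighbors_reads
  exact getNeighbors_reads_eq lendict cur_point minreads hpre
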